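-- pv_equiv track=rewrite | github.com/raulpenaguiao/project-euler | archive/Euler03__/Euler377/Euler377.py | f_list
-- ===== SOURCE A (Python) =====
-- def f_list(n, MOD):
--     dp_f = [[0 for _ in range(n+1)] for _ in range(n+1)]
--     dp_c = [[0 for _ in range(n+1)] for _ in range(n+1)]
--     dp_c[0][0] = 1
--     for m in range(1, n+1):
--         for k in range(1, m + 1):
--             for d in range(1, min(9, m)+1):
--                 dp_c[m][k] += dp_c[m-d][k-1]
--                 dp_c[m][k] %= MOD
--                 dp_f[m][k] += dp_f[m-d][k-1] + d*10**(k-1)*dp_c[m-d][k-1]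
--                 dp_f[m][k] %= MOD
--     return [sum(r)%MOD for r in dp_f]
-- ===== SOURCE B (Python) =====
-- def f_list(n, MOD):
--     # Collapse the digit-count dimension: two 1-D recurrences over the last digit d = 1..9.
--     # W[m] == sum over k of 10**k * (number of k-digit strings over 1..9 with digit sum m), mod MOD
--     # G[m] == sum of the values of all numbers (digits 1..9) with digit sum m, mod MOD
--     if n < 0:
--         return []
--     W = [1 % MOD]
--     G = [0]
--     for m in range(1, n + 1):
--         s = 0
--         t = 0
--         for d in range(1, min(9, m) + 1):
--             s += W[-d]
--             t += G[-d] + d * W[-d]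
--         W.append((10 * s) % MOD)
--         G.append(t % MOD)
--     return G
-- ===== Notes on version B (the rewrite author's own statement) =====
-- stated objective: faster
-- what changed: Collapsed the digit-count dimension k: instead of an (n+1)x(n+1) DP table over (digit sum, digit count), B keeps two 1-D arrays W[m] (10^k-weighted count of numbers with digit sum m, mod MOD) and G[m] (sum of their values, mod MOD), each updated from the previous nine entries only.
import Mathlib
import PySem

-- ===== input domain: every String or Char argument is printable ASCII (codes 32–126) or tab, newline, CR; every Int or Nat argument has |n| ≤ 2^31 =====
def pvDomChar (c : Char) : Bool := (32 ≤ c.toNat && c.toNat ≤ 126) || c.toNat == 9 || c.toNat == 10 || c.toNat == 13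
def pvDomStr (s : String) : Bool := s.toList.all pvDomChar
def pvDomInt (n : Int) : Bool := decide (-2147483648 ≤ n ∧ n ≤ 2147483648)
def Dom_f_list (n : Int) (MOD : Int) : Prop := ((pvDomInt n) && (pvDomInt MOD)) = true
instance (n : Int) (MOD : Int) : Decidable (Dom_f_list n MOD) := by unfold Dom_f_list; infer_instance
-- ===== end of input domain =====

-- B collapses A's (n+1)x(n+1) DP over (digit sum, digit count) into two 1-D recurrences
-- (a 10^k-weighted count and a running value sum), the same outputs with O(n) instead of O(n^2) work.


-- ===== PORT A =====
-- dp[i][j] read: Python's dp[i][j]; every index A uses is nonnegative and in range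
def get2 (t : List (List Int)) (i j : Int) : Int :=
  PySem.List.pyGetD (PySem.List.pyGetD t i []) j 0

-- dp[i][j] = v  (in-range write; Python's list assignment)
def set2 (t : List (List Int)) (i j : Int) (v : Int) : List (List Int) :=
  t.set i.toNat ((PySem.List.pyGetD t i []).set j.toNat v)

-- body of A's innermost 'for d' loop (the two '+= ; %= MOD' statement pairs, in order)
def stepD_A (MOD : Int) (m k : Int) (st : List (List Int) × List (List Int)) (d : Int) :
    List (List Int) × List (List Int) :=
  let c := st.1
  let f := st.2
  let c' := set2 c m k (PySem.Int.mod (get2 c m k + get2 c (m - d) (k - 1)) MOD)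
  let f' := set2 f m k
    (PySem.Int.mod (get2 f m k + (get2 f (m - d) (k - 1) + d * 10 ^ (k - 1).toNat * get2 c' (m - d) (k - 1))) MOD)
  (c', f')

-- one iteration of A's outer 'for m' loop ('for k' and 'for d' nested inside)
def stepM_A (MOD : Int) (st : List (List Int) × List (List Int)) (m : Int) :
    List (List Int) × List (List Int) :=
  (PySem.List.pyRange 1 (m + 1) 1).foldl
    (fun st k => (PySem.List.pyRange 1 (min 9 m + 1) 1).foldl (stepD_A MOD m k) st) st

def f_list (n : Int) (MOD : Int) : List Int :=
  let zeros : List (List Int) :=                               -- [[0 for _ in range(n+1)] for _ in range(n+1)]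
    (PySem.List.pyRange 0 (n + 1) 1).map (fun _ => (PySem.List.pyRange 0 (n + 1) 1).map (fun _ => 0))
  let c0 := set2 zeros 0 0 1                                   -- dp_c[0][0] = 1
  let st := (PySem.List.pyRange 1 (n + 1) 1).foldl (stepM_A MOD) (c0, zeros)
  st.2.map (fun r => PySem.Int.mod r.sum MOD)                  -- [sum(r) % MOD for r in dp_f]

-- ===== PORT B =====
-- B's Python lists W, G are ported as Arrays (append = push, xs[-d] = element size - d);
-- every read is in range.
-- one iteration of B's 'for m' loop: two running sums s, t over d = 1 .. min(9, m)
def stepM_B (MOD : Int) (st : Array Int × Array Int) (m : Int) : Array Int × Array Int :=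
  let W := st.1
  let G := st.2
  let p := (PySem.List.pyRange 1 (min 9 m + 1) 1).foldl
    (fun (p : Int × Int) d => (p.1 + W.getD (W.size - d.toNat) 0,
      p.2 + (G.getD (G.size - d.toNat) 0 + d * W.getD (W.size - d.toNat) 0))) (0, 0)
  (W.push (PySem.Int.mod (10 * p.1) MOD), G.push (PySem.Int.mod p.2 MOD))

def f_list_alt (n : Int) (MOD : Int) : List Int :=
  if n < 0 then []
  else
    let st := (PySem.List.pyRange 1 (n + 1) 1).foldl (stepM_B MOD)
      (#[PySem.Int.mod 1 MOD], #[0])        -- W = [1 % MOD]; G = [0]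
    st.2.toList                              -- return G

-- ===== PRECONDITION & SPEC =====
-- A raises IndexError for n < 0 (the table is empty, dp_c[0][0] fails) and
-- ZeroDivisionError for MOD = 0; nothing else is excluded.
def Pre_f_list (n : Int) (MOD : Int) : Prop := 0 ≤ n ∧ MOD ≠ 0
instance (n : Int) (MOD : Int) : Decidable (Pre_f_list n MOD) := by unfold Pre_f_list; infer_instance
def pvWitness_f_list : Int × Int := (3, 7)

def Spec_f_list (n : Int) (MOD : Int) (out : List Int) : Prop := out = f_list_alt n MOD
instance (n : Int) (MOD : Int) (out : List Int) : Decidable (Spec_f_list n MOD out) := by unfold Spec_f_list; infer_instance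

-- ===== CLAIM (what is proved, stated in full; the proofs are below) =====
def Claim_equal_f_list : Prop := ∀ (n : Int) (MOD : Int), Dom_f_list n MOD → Pre_f_list n MOD → Spec_f_list n MOD (f_list n MOD)

-- ===== LEMMAS AND PROOFS =====
-- Proof plan: a function-level model (fnUpd2/fnStepD/… mirroring both loops) is proved
-- equivalent across the two algorithms via a loop invariant linking A's 2-D table row sums
-- to B's 1-D arrays through Python-% congruences; then each port is shown to simulate its
-- fn-level model (lists/arrays ↔ total functions), which assembles the final theorem.

def fnUpd2 (f : Int → Int → Int) (i j : Int) (v : Int) : Int → Int → Int :=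
  fun a b => if a = i ∧ b = j then v else f a b

-- body of A's innermost 'for d' loop (the two '+= ; %= MOD' statement pairs, in order)
def fnStepD (MOD : Int) (m k : Int) (st : (Int → Int → Int) × (Int → Int → Int)) (d : Int) :
    (Int → Int → Int) × (Int → Int → Int) :=
  let c := st.1
  let f := st.2
  let c' := fnUpd2 c m k (PySem.Int.mod (c m k + c (m - d) (k - 1)) MOD)
  let f' := fnUpd2 f m k
    (PySem.Int.mod (f m k + (f (m - d) (k - 1) + d * 10 ^ (k - 1).toNat * c' (m - d) (k - 1))) MOD)
  (c', f')

-- one iteration of A's outer 'for m' loop ('for k' and 'for d' nested inside)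
def fnStepM_A (MOD : Int) (st : (Int → Int → Int) × (Int → Int → Int)) (m : Int) :
    (Int → Int → Int) × (Int → Int → Int) :=
  (PySem.List.pyRange 1 (m + 1) 1).foldl
    (fun st k => (PySem.List.pyRange 1 (min 9 m + 1) 1).foldl (fnStepD MOD m k) st) st

def fnA (n : Int) (MOD : Int) : List Int :=
  let c0 := fnUpd2 (fun _ _ => 0) 0 0 1        -- dp_c, all zeros, then dp_c[0][0] = 1
  let f0 : Int → Int → Int := fun _ _ => 0     -- dp_f
  let st := (PySem.List.pyRange 1 (n + 1) 1).foldl (fnStepM_A MOD) (c0, f0)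
  (PySem.List.pyRange 0 (n + 1) 1).map (fun m =>
    PySem.Int.mod (((PySem.List.pyRange 0 (n + 1) 1).map (fun k => st.2 m k)).sum) MOD)

-- ===== PORT B =====
-- B's 1-D lists W, G are likewise ported as total functions Int → Int.
def fnUpd1 (f : Int → Int) (i : Int) (v : Int) : Int → Int :=
  fun a => if a = i then v else f a

-- one iteration of B's 'for m' loop: two running sums s, t over d = 1 .. min(9, m)
def fnStepM_B (MOD : Int) (st : (Int → Int) × (Int → Int)) (m : Int) :
    (Int → Int) × (Int → Int) :=
  let W := st.1
  let G := st.2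
  let p := (PySem.List.pyRange 1 (min 9 m + 1) 1).foldl
    (fun (p : Int × Int) d => (p.1 + W (m - d), p.2 + (G (m - d) + d * W (m - d)))) (0, 0)
  (fnUpd1 W m (PySem.Int.mod (10 * p.1) MOD), fnUpd1 G m (PySem.Int.mod p.2 MOD))

def fnB (n : Int) (MOD : Int) : List Int :=
  if n < 0 then []
  else
    let W0 := fnUpd1 (fun _ => 0) 0 (PySem.Int.mod 1 MOD)   -- W = [0]*(n+1); W[0] = 1 % MOD
    let G0 : Int → Int := fun _ => 0                         -- G = [0]*(n+1)
    let st := (PySem.List.pyRange 1 (n + 1) 1).foldl (fnStepM_B MOD) (W0, G0)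
    (PySem.List.pyRange 0 (n + 1) 1).map st.2


theorem pmDvd (a b : Int) : b ∣ (a - PySem.Int.mod a b) :=
  ⟨PySem.Int.floordiv a b, by
    have h := PySem.Int.floordiv_mul_add_mod a b
    linarith [mul_comm (PySem.Int.floordiv a b) b]⟩

theorem pmCongr {b : Int} (hb : b ≠ 0) {a a' : Int} (h : b ∣ (a - a')) :
    PySem.Int.mod a b = PySem.Int.mod a' b := by
  have h1 := pmDvd a b
  have h2 := pmDvd a' b
  have hd : b ∣ (PySem.Int.mod a b - PySem.Int.mod a' b) := by
    have h3 := (h2.sub h1).add h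
    have he : (a' - PySem.Int.mod a' b) - (a - PySem.Int.mod a b) + (a - a')
        = PySem.Int.mod a b - PySem.Int.mod a' b := by ring
    rwa [he] at h3
  obtain ⟨t, ht⟩ := hd
  rcases lt_or_gt_of_ne hb with hneg | hpos
  · obtain ⟨u1, u2⟩ := PySem.Int.mod_neg_bounds a hneg
    obtain ⟨v1, v2⟩ := PySem.Int.mod_neg_bounds a' hneg
    rcases lt_trichotomy t 0 with h0 | h0 | h0 <;> nlinarith
  · have u1 := PySem.Int.mod_nonneg a hpos; have u2 := PySem.Int.mod_lt a hpos
    have v1 := PySem.Int.mod_nonneg a' hpos; have v2 := PySem.Int.mod_lt a' hpos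
    rcases lt_trichotomy t 0 with h0 | h0 | h0 <;> nlinarith

theorem pmZero {b : Int} (hb : b ≠ 0) : PySem.Int.mod 0 b = 0 := by
  obtain ⟨t, ht⟩ := pmDvd 0 b
  rcases lt_or_gt_of_ne hb with hneg | hpos
  · obtain ⟨u1, u2⟩ := PySem.Int.mod_neg_bounds 0 hneg
    rcases lt_trichotomy t 0 with h0 | h0 | h0 <;> nlinarith
  · have u1 := PySem.Int.mod_nonneg 0 hpos; have u2 := PySem.Int.mod_lt 0 hpos
    rcases lt_trichotomy t 0 with h0 | h0 | h0 <;> nlinarith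

theorem foldl_pm_add {MOD : Int} (hM : MOD ≠ 0) (g : Int → Int) :
    ∀ (l : List Int), l ≠ [] → ∀ (a : Int),
      l.foldl (fun acc d => PySem.Int.mod (acc + g d) MOD) a
        = PySem.Int.mod (a + (l.map g).sum) MOD
  | [], h, _ => absurd rfl h
  | x :: xs, _, a => by
    by_cases hx : xs = []
    · subst hx; simp
    · simp only [List.foldl_cons, List.map_cons, List.sum_cons]
      rw [foldl_pm_add hM g xs hx _]
      apply pmCongr hM
      have h2 := pmDvd (a + g x) MOD
      have he : (PySem.Int.mod (a + g x) MOD + (xs.map g).sum) - (a + (g x + (xs.map g).sum))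
          = -((a + g x) - PySem.Int.mod (a + g x) MOD) := by ring
      rw [he]; exact dvd_neg.mpr h2

theorem fnUpd2_self (c : Int → Int → Int) (m k : Int) : fnUpd2 c m k (c m k) = c := by
  funext a b
  by_cases h : a = m ∧ b = k
  · obtain ⟨rfl, rfl⟩ := h; simp [fnUpd2]
  · simp [fnUpd2, h]

theorem fnUpd2_upd (c : Int → Int → Int) (m k v w : Int) :
    fnUpd2 (fnUpd2 c m k v) m k w = fnUpd2 c m k w := by
  funext a b
  by_cases h : a = m ∧ b = k <;> simp [fnUpd2, h]

theorem fnUpd2_at (c : Int → Int → Int) (m k v : Int) : fnUpd2 c m k v m k = v := by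
  simp [fnUpd2]

theorem fnUpd2_ne (c : Int → Int → Int) (m k v a b : Int) (h : ¬(a = m ∧ b = k)) :
    fnUpd2 c m k v a b = c a b := by
  simp [fnUpd2, h]

theorem dLoop_A (MOD m k : Int) :
    ∀ (l : List Int), (∀ d ∈ l, 1 ≤ d) → ∀ (c f : Int → Int → Int),
      l.foldl (fnStepD MOD m k) (c, f)
        = (fnUpd2 c m k (l.foldl (fun a d => PySem.Int.mod (a + c (m - d) (k - 1)) MOD) (c m k)),
           fnUpd2 f m k (l.foldl (fun a d =>
             PySem.Int.mod (a + (f (m - d) (k - 1) + d * 10 ^ (k - 1).toNat * c (m - d) (k - 1))) MOD) (f m k)))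
  | [], _, c, f => by simp [fnUpd2_self]
  | x :: xs, hl, c, f => by
    have hx1 : (1:Int) ≤ x := hl x (List.mem_cons_self ..)
    have hmx : ¬(m - x = m ∧ k - 1 = k) := by omega
    simp only [List.foldl_cons]
    have hbody : fnStepD MOD m k (c, f) x
        = (fnUpd2 c m k (PySem.Int.mod (c m k + c (m - x) (k - 1)) MOD),
           fnUpd2 f m k (PySem.Int.mod (f m k + (f (m - x) (k - 1) + x * 10 ^ (k - 1).toNat * c (m - x) (k - 1))) MOD)) := by
      simp only [fnStepD]
      rw [fnUpd2_ne c m k _ (m - x) (k - 1) hmx]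
    rw [hbody, dLoop_A MOD m k xs (fun d hd => hl d (List.mem_cons_of_mem _ hd)) _ _]
    rw [fnUpd2_upd, fnUpd2_upd, fnUpd2_at, fnUpd2_at]
    rw [Prod.mk.injEq]
    constructor <;>
    · congr 1
      apply PySem.List.foldl_congr_mem
      intro acc d hd
      have hd1 : (1:Int) ≤ d := hl d (List.mem_cons_of_mem _ hd)
      rw [fnUpd2_ne c m k _ (m - d) (k - 1) (by omega)]
      try rw [fnUpd2_ne f m k _ (m - d) (k - 1) (by omega)]

def rowC (MOD : Int) (c : Int → Int → Int) (m k : Int) : Int :=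
  (PySem.List.pyRange 1 (min 9 m + 1) 1).foldl
    (fun a d => PySem.Int.mod (a + c (m - d) (k - 1)) MOD) (c m k)

def rowF (MOD : Int) (c f : Int → Int → Int) (m k : Int) : Int :=
  (PySem.List.pyRange 1 (min 9 m + 1) 1).foldl
    (fun a d => PySem.Int.mod (a + (f (m - d) (k - 1) + d * 10 ^ (k - 1).toNat * c (m - d) (k - 1))) MOD) (f m k)

def maskC (MOD : Int) (c : Int → Int → Int) (m hi : Int) : Int → Int → Int :=
  fun a b => if a = m ∧ 1 ≤ b ∧ b < hi then rowC MOD c m b else c a b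

def maskF (MOD : Int) (c f : Int → Int → Int) (m hi : Int) : Int → Int → Int :=
  fun a b => if a = m ∧ 1 ≤ b ∧ b < hi then rowF MOD c f m b else f a b

theorem kLoop_A (MOD m : Int) (j : Nat) :
    ∀ (c f : Int → Int → Int),
      (PySem.List.pyRange 1 (1 + (j:Int)) 1).foldl
          (fun st k => (PySem.List.pyRange 1 (min 9 m + 1) 1).foldl (fnStepD MOD m k) st) (c, f)
        = (maskC MOD c m (1 + (j:Int)), maskF MOD c f m (1 + (j:Int))) := by
  induction j with
  | zero =>
    intro c f
    rw [show PySem.List.pyRange 1 (1 + ((0:Nat):Int)) 1 = [] from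
      PySem.List.pyRange_one_eq_nil (by norm_num), List.foldl_nil, Prod.mk.injEq]
    constructor <;> (funext a b; simp only [maskC, maskF]; rw [if_neg (by omega)])
  | succ j ih =>
    intro c f
    have hsplit : PySem.List.pyRange 1 (1 + ((j+1 : Nat) : Int)) 1
        = PySem.List.pyRange 1 (1 + (j:Int)) 1 ++ [1 + (j:Int)] := by
      rw [show (1 + ((j+1:Nat):Int)) = (1 + (j:Int)) + 1 by push_cast; ring]
      exact PySem.List.pyRange_one_succ_right (by omega)
    rw [hsplit, List.foldl_append, ih c f, List.foldl_cons, List.foldl_nil]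
    rw [dLoop_A MOD m (1 + (j:Int)) _ (fun d hd => ((PySem.List.mem_pyRange_one).mp hd).1) _ _]
    have hV1 : (PySem.List.pyRange 1 (min 9 m + 1) 1).foldl
        (fun a d => PySem.Int.mod (a + maskC MOD c m (1+(j:Int)) (m - d) ((1+(j:Int)) - 1)) MOD)
        (maskC MOD c m (1+(j:Int)) m (1+(j:Int)))
      = rowC MOD c m (1+(j:Int)) := by
      rw [show maskC MOD c m (1+(j:Int)) m (1+(j:Int)) = c m (1+(j:Int)) from by
        simp only [maskC]; rw [if_neg (by omega)]]
      unfold rowC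
      apply PySem.List.foldl_congr_mem
      intro acc d hd
      have hd1 := ((PySem.List.mem_pyRange_one).mp hd).1
      simp only [maskC]; rw [if_neg (by omega)]
    have hV2 : (PySem.List.pyRange 1 (min 9 m + 1) 1).foldl
        (fun a d => PySem.Int.mod (a + (maskF MOD c f m (1+(j:Int)) (m - d) ((1+(j:Int)) - 1)
          + d * 10 ^ ((1+(j:Int)) - 1).toNat * maskC MOD c m (1+(j:Int)) (m - d) ((1+(j:Int)) - 1))) MOD)
        (maskF MOD c f m (1+(j:Int)) m (1+(j:Int)))
      = rowF MOD c f m (1+(j:Int)) := by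
      rw [show maskF MOD c f m (1+(j:Int)) m (1+(j:Int)) = f m (1+(j:Int)) from by
        simp only [maskF]; rw [if_neg (by omega)]]
      unfold rowF
      apply PySem.List.foldl_congr_mem
      intro acc d hd
      have hd1 := ((PySem.List.mem_pyRange_one).mp hd).1
      simp only [maskC, maskF]; rw [if_neg (by omega), if_neg (by omega)]
    rw [hV1, hV2, Prod.mk.injEq]
    constructor
    · funext a b
      simp only [fnUpd2, maskC]
      split_ifs <;> first
        | rfl
        | omega
        | (rw [show b = 1 + (j:Int) by omega])
    · funext a b
      simp only [fnUpd2, maskF]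
      split_ifs <;> first
        | rfl
        | omega
        | (rw [show b = 1 + (j:Int) by omega])

def wsum (N : Nat) (c : Int → Int → Int) (m : Int) : Int :=
  ∑ i ∈ Finset.range N, 10 ^ i * c m (i : Int)

def fsum (N : Nat) (f : Int → Int → Int) (m : Int) : Int :=
  ∑ i ∈ Finset.range N, f m (i : Int)

def InvAB (n MOD M : Int) (stA : (Int → Int → Int) × (Int → Int → Int))
    (stB : (Int → Int) × (Int → Int)) : Prop :=
  (∀ r k : Int, (M < r ∨ k < 0 ∨ r < k) → stA.1 r k = 0 ∧ stA.2 r k = 0) ∧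
  (∀ r : Int, 0 ≤ r → r ≤ M →
    stB.1 r = PySem.Int.mod (wsum (n+1).toNat stA.1 r) MOD ∧
    stB.2 r = PySem.Int.mod (fsum (n+1).toNat stA.2 r) MOD)

theorem dvd_listsum_sub {b : Int} (l : List Int) (f g : Int → Int)
    (h : ∀ x ∈ l, b ∣ (f x - g x)) : b ∣ ((l.map f).sum - (l.map g).sum) := by
  induction l with
  | nil => simp
  | cons x xs ih =>
    simp only [List.map_cons, List.sum_cons]
    have h1 := h x (List.mem_cons_self ..)
    have h2 := ih (fun y hy => h y (List.mem_cons_of_mem _ hy))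
    have he : (f x + (xs.map f).sum) - (g x + (xs.map g).sum)
        = (f x - g x) + ((xs.map f).sum - (xs.map g).sum) := by ring
    rw [he]; exact h1.add h2

theorem modsub_dvd {b : Int} (x : Int) : b ∣ (PySem.Int.mod x b - x) := by
  have he : PySem.Int.mod x b - x = -(x - PySem.Int.mod x b) := by ring
  rw [he]; exact dvd_neg.mpr (pmDvd x b)

theorem listFinsetSwap (N : Nat) (D : List Int) (g : Nat → Int → Int) :
    ∑ i ∈ Finset.range N, (D.map (fun d => g i d)).sum
      = (D.map (fun d => ∑ i ∈ Finset.range N, g i d)).sum := by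
  induction D with
  | nil => simp
  | cons x xs ih => simp only [List.map_cons, List.sum_cons, Finset.sum_add_distrib, ih]

theorem listFinsetSwapW (N : Nat) (D : List Int) (w : Nat → Int) (g : Nat → Int → Int) :
    ∑ i ∈ Finset.range N, w i * (D.map (fun d => g i d)).sum
      = (D.map (fun d => ∑ i ∈ Finset.range N, w i * g i d)).sum := by
  induction D with
  | nil => simp
  | cons x xs ih => simp only [List.map_cons, List.sum_cons, mul_add, Finset.sum_add_distrib, ih]

theorem stepPreserves (n MOD M : Int) (hMOD : MOD ≠ 0) (hM0 : 0 ≤ M) (hMn : M + 1 ≤ n)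
    (c f : Int → Int → Int) (W G : Int → Int)
    (h : InvAB n MOD M (c, f) (W, G)) :
    InvAB n MOD (M + 1) (fnStepM_A MOD (c, f) (M + 1)) (fnStepM_B MOD (W, G) (M + 1)) := by
  obtain ⟨hZ, hWG⟩ := h
  dsimp only at hZ hWG
  have hA : fnStepM_A MOD (c, f) (M+1) = (maskC MOD c (M+1) ((M+1) + 1), maskF MOD c f (M+1) ((M+1)+1)) := by
    unfold fnStepM_A
    have hj : (1 + (((M+1).toNat : Nat) : Int)) = (M+1) + 1 := by omega
    rw [show PySem.List.pyRange 1 ((M+1) + 1) 1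
        = PySem.List.pyRange 1 (1 + (((M+1).toNat : Nat) : Int)) 1 from by rw [hj]]
    rw [kLoop_A MOD (M+1) (M+1).toNat c f, hj]
  have hB : fnStepM_B MOD (W, G) (M+1) =
      (fnUpd1 W (M+1) (PySem.Int.mod
        (10 * ((PySem.List.pyRange 1 (min 9 (M+1) + 1) 1).foldl (fun s e => s + W ((M+1) - e)) 0)) MOD),
       fnUpd1 G (M+1) (PySem.Int.mod
        ((PySem.List.pyRange 1 (min 9 (M+1) + 1) 1).foldl (fun s e => s + (G ((M+1) - e) + e * W ((M+1) - e))) 0) MOD)) := by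
    simp only [fnStepM_B]
    rw [PySem.List.foldl_prod_mk (f := fun s e => s + W ((M+1) - e))
        (g := fun s e => s + (G ((M+1) - e) + e * W ((M+1) - e)))]
  rw [hA, hB]
  rw [PySem.List.foldl_add, PySem.List.foldl_add, zero_add, zero_add]
  set N := (n+1).toNat with hN0
  set D := PySem.List.pyRange 1 (min 9 (M+1) + 1) 1 with hDdef
  have hDmem : ∀ d ∈ D, 1 ≤ d ∧ d < min 9 (M+1) + 1 := fun d hd => (PySem.List.mem_pyRange_one).mp hd
  have hDne : D ≠ [] := by
    rw [hDdef, PySem.List.pyRange_one_cons (by omega)]; exact List.cons_ne_nil _ _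
  have hmask : ∀ b : Int, maskC MOD c (M+1) ((M+1)+1) (M+1) b
      = if 1 ≤ b ∧ b < (M+1)+1 then
          PySem.Int.mod ((D.map (fun d => c ((M+1) - d) (b - 1))).sum) MOD else 0 := by
    intro b
    simp only [maskC]
    by_cases hb : 1 ≤ b ∧ b < (M+1)+1
    · rw [if_pos ⟨by trivial, hb.1, hb.2⟩, if_pos hb]
      unfold rowC
      rw [foldl_pm_add hMOD _ D hDne (c (M+1) b), (hZ (M+1) b (by omega)).1, zero_add]
    · rw [if_neg (by tauto), if_neg hb]; exact (hZ (M+1) b (by omega)).1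
  have hmaskF : ∀ b : Int, maskF MOD c f (M+1) ((M+1)+1) (M+1) b
      = if 1 ≤ b ∧ b < (M+1)+1 then
          PySem.Int.mod ((D.map (fun d =>
            f ((M+1) - d) (b - 1) + d * 10 ^ (b - 1).toNat * c ((M+1) - d) (b - 1))).sum) MOD else 0 := by
    intro b
    simp only [maskF]
    by_cases hb : 1 ≤ b ∧ b < (M+1)+1
    · rw [if_pos ⟨by trivial, hb.1, hb.2⟩, if_pos hb]
      unfold rowF
      rw [foldl_pm_add hMOD _ D hDne (f (M+1) b), (hZ (M+1) b (by omega)).2, zero_add]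
    · rw [if_neg (by tauto), if_neg hb]; exact (hZ (M+1) b (by omega)).2
  have hWd : ∀ d ∈ D, W ((M+1) - d) = PySem.Int.mod (wsum N c ((M+1)-d)) MOD
      ∧ G ((M+1) - d) = PySem.Int.mod (fsum N f ((M+1)-d)) MOD := by
    intro d hd
    obtain ⟨hd1, hd2⟩ := hDmem d hd
    exact hWG _ (by omega) (by omega)
  unfold InvAB
  constructor
  · intro r k hcond
    constructor
    · show maskC MOD c (M+1) ((M+1)+1) r k = 0
      simp only [maskC]
      by_cases hc : r = M+1 ∧ 1 ≤ k ∧ k < (M+1)+1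
      · exfalso; omega
      · rw [if_neg hc]; exact (hZ r k (by omega)).1
    · show maskF MOD c f (M+1) ((M+1)+1) r k = 0
      simp only [maskF]
      by_cases hc : r = M+1 ∧ 1 ≤ k ∧ k < (M+1)+1
      · exfalso; omega
      · rw [if_neg hc]; exact (hZ r k (by omega)).2
  · intro r hr0 hrM
    by_cases hr : r ≤ M
    · have e1 : wsum N (maskC MOD c (M+1) ((M+1)+1)) r = wsum N c r := by
        unfold wsum
        refine Finset.sum_congr rfl (fun i _ => ?_)
        simp only [maskC]; rw [if_neg (by omega)]
      have e2 : fsum N (maskF MOD c f (M+1) ((M+1)+1)) r = fsum N f r := by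
        unfold fsum
        refine Finset.sum_congr rfl (fun i _ => ?_)
        simp only [maskF]; rw [if_neg (by omega)]
      constructor
      · show fnUpd1 W (M+1) _ r = _
        simp only [fnUpd1]; rw [if_neg (by omega)]
        show W r = PySem.Int.mod (wsum N (maskC MOD c (M+1) ((M+1)+1)) r) MOD
        rw [e1]; exact (hWG r hr0 hr).1
      · show fnUpd1 G (M+1) _ r = _
        simp only [fnUpd1]; rw [if_neg (by omega)]
        show G r = PySem.Int.mod (fsum N (maskF MOD c f (M+1) ((M+1)+1)) r) MOD
        rw [e2]; exact (hWG r hr0 hr).2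
    · have hrm : r = M+1 := by omega
      subst hrm
      constructor
      · -- W component at row M+1
        show fnUpd1 W (M+1) _ (M+1) = _
        simp only [fnUpd1]; rw [if_pos (by trivial)]
        apply pmCongr hMOD
        have dvd1 : MOD ∣ ((D.map (fun d => W ((M+1) - d))).sum
            - (D.map (fun d => wsum N c ((M+1) - d))).sum) := by
          rw [List.map_congr_left (fun d hd => (hWd d hd).1)]
          exact dvd_listsum_sub D _ _ (fun x _ => modsub_dvd _)
        have hT : MOD ∣ (∑ i ∈ Finset.range N, 10^i * (D.map (fun d => c ((M+1)-d) ((i:Int) - 1))).sum)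
            - wsum N (maskC MOD c (M+1) ((M+1)+1)) (M+1) := by
          unfold wsum
          rw [← Finset.sum_sub_distrib]
          apply Finset.dvd_sum
          intro i _
          rw [hmask ((i:Int))]
          by_cases hb : 1 ≤ (i:Int) ∧ (i:Int) < (M+1)+1
          · rw [if_pos hb]
            have he : (10:Int)^i * (D.map (fun d => c ((M+1)-d) ((i:Int) - 1))).sum
                - 10^i * PySem.Int.mod ((D.map (fun d => c ((M+1)-d) ((i:Int) - 1))).sum) MOD
                = 10^i * -(PySem.Int.mod ((D.map (fun d => c ((M+1)-d) ((i:Int) - 1))).sum) MOD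
                    - (D.map (fun d => c ((M+1)-d) ((i:Int) - 1))).sum) := by ring
            rw [he]
            exact (dvd_neg.mpr (modsub_dvd _)).mul_left _
          · rw [if_neg hb]
            have hS : (D.map (fun d => c ((M+1)-d) ((i:Int) - 1))).sum = 0 := by
              rw [List.map_congr_left (g := fun _ => (0:Int)) (fun d hd => by
                obtain ⟨hd1, hd2⟩ := hDmem d hd
                exact (hZ _ _ (by omega)).1)]
              simp
            rw [hS]; simp
        have hswap := listFinsetSwapW N D (fun i => (10:Int)^i) (fun i d => c ((M+1)-d) ((i:Int) - 1))
        have hinner : ∀ d ∈ D, (∑ i ∈ Finset.range N, 10^i * c ((M+1)-d) ((i:Int) - 1))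
            = 10 * wsum N c ((M+1)-d) := by
          intro d hd
          obtain ⟨hd1, hd2⟩ := hDmem d hd
          have hNn : N = n.toNat + 1 := by omega
          calc ∑ i ∈ Finset.range N, 10^i * c ((M+1)-d) ((i:Int) - 1)
              = ∑ i ∈ Finset.range (n.toNat+1), 10^i * c ((M+1)-d) ((i:Int) - 1) := by rw [hNn]
            _ = (∑ j ∈ Finset.range n.toNat, 10^(j+1) * c ((M+1)-d) (((j+1:Nat):Int) - 1))
                + 10^0 * c ((M+1)-d) (((0:Nat):Int) - 1) :=
                Finset.sum_range_succ' (fun i => 10^i * c ((M+1)-d) ((i:Int) - 1)) n.toNat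
            _ = ∑ j ∈ Finset.range n.toNat, 10 * (10^j * c ((M+1)-d) ((j:Int))) := by
                rw [show (((0:Nat):Int) - 1) = (-1:Int) by simp,
                  (hZ ((M+1)-d) (-1) (by omega)).1, mul_zero, add_zero]
                exact Finset.sum_congr rfl (fun j _ => by
                  rw [show (((j+1:Nat)):Int) - 1 = (j:Int) from by push_cast; ring]; ring)
            _ = 10 * ∑ j ∈ Finset.range n.toNat, 10^j * c ((M+1)-d) ((j:Int)) := by
                rw [Finset.mul_sum]
            _ = 10 * ∑ i ∈ Finset.range (n.toNat+1), 10^i * c ((M+1)-d) ((i:Int)) := by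
                rw [Finset.sum_range_succ, (hZ ((M+1)-d) ((n.toNat:Int)) (by omega)).1, mul_zero, add_zero]
            _ = 10 * wsum N c ((M+1)-d) := by unfold wsum; rw [hNn]
        have hmul : (D.map (fun d => 10 * wsum N c ((M+1)-d))).sum
            = 10 * (D.map (fun d => wsum N c ((M+1)-d))).sum :=
          PySem.List.sum_map_const_mul_int D 10 _
        rw [hswap, List.map_congr_left hinner, hmul] at hT
        have he : 10 * ((D.map (fun d => W ((M+1) - d))).sum)
            - wsum N (maskC MOD c (M+1) ((M+1)+1)) (M+1)
            = 10 * ((D.map (fun d => W ((M+1) - d))).sum - (D.map (fun d => wsum N c ((M+1) - d))).sum)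
              + (10 * (D.map (fun d => wsum N c ((M+1) - d))).sum
                  - wsum N (maskC MOD c (M+1) ((M+1)+1)) (M+1)) := by ring
        rw [he]
        exact dvd_add (dvd1.mul_left 10) hT
      · -- G component at row M+1
        show fnUpd1 G (M+1) _ (M+1) = _
        simp only [fnUpd1]; rw [if_pos (by trivial)]
        apply pmCongr hMOD
        have dvd1 : MOD ∣ ((D.map (fun d => G ((M+1) - d) + d * W ((M+1) - d))).sum
            - (D.map (fun d => fsum N f ((M+1) - d) + d * wsum N c ((M+1) - d))).sum) := by
          apply dvd_listsum_sub
          intro d hd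
          have h1 := (hWd d hd).1
          have h2 := (hWd d hd).2
          rw [h1, h2]
          have he : (PySem.Int.mod (fsum N f ((M+1)-d)) MOD + d * PySem.Int.mod (wsum N c ((M+1)-d)) MOD)
              - (fsum N f ((M+1)-d) + d * wsum N c ((M+1)-d))
              = (PySem.Int.mod (fsum N f ((M+1)-d)) MOD - fsum N f ((M+1)-d))
                + d * (PySem.Int.mod (wsum N c ((M+1)-d)) MOD - wsum N c ((M+1)-d)) := by ring
          rw [he]
          exact dvd_add (modsub_dvd _) ((modsub_dvd _).mul_left d)
        have hT : MOD ∣ (∑ i ∈ Finset.range N, (D.map (fun d =>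
              f ((M+1)-d) ((i:Int) - 1) + d * 10 ^ ((i:Int) - 1).toNat * c ((M+1)-d) ((i:Int) - 1))).sum)
            - fsum N (maskF MOD c f (M+1) ((M+1)+1)) (M+1) := by
          unfold fsum
          rw [← Finset.sum_sub_distrib]
          apply Finset.dvd_sum
          intro i _
          rw [hmaskF ((i:Int))]
          by_cases hb : 1 ≤ (i:Int) ∧ (i:Int) < (M+1)+1
          · rw [if_pos hb]
            have he : (D.map (fun d =>
                  f ((M+1)-d) ((i:Int) - 1) + d * 10 ^ ((i:Int) - 1).toNat * c ((M+1)-d) ((i:Int) - 1))).sum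
                - PySem.Int.mod ((D.map (fun d =>
                  f ((M+1)-d) ((i:Int) - 1) + d * 10 ^ ((i:Int) - 1).toNat * c ((M+1)-d) ((i:Int) - 1))).sum) MOD
                = -(PySem.Int.mod ((D.map (fun d =>
                  f ((M+1)-d) ((i:Int) - 1) + d * 10 ^ ((i:Int) - 1).toNat * c ((M+1)-d) ((i:Int) - 1))).sum) MOD
                  - (D.map (fun d =>
                  f ((M+1)-d) ((i:Int) - 1) + d * 10 ^ ((i:Int) - 1).toNat * c ((M+1)-d) ((i:Int) - 1))).sum) := by
              ring
            rw [he]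
            exact dvd_neg.mpr (modsub_dvd _)
          · rw [if_neg hb]
            have hS : (D.map (fun d =>
                f ((M+1)-d) ((i:Int) - 1) + d * 10 ^ ((i:Int) - 1).toNat * c ((M+1)-d) ((i:Int) - 1))).sum = 0 := by
              rw [List.map_congr_left (g := fun _ => (0:Int)) (fun d hd => by
                obtain ⟨hd1, hd2⟩ := hDmem d hd
                rw [(hZ ((M+1)-d) ((i:Int)-1) (by omega)).1, (hZ ((M+1)-d) ((i:Int)-1) (by omega)).2]
                ring)]
              simp
            rw [hS]; simp
        have hswap : (∑ i ∈ Finset.range N, (D.map (fun d =>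
              f ((M+1)-d) ((i:Int) - 1) + d * 10 ^ ((i:Int) - 1).toNat * c ((M+1)-d) ((i:Int) - 1))).sum)
            = (D.map (fun d => ∑ i ∈ Finset.range N,
              (f ((M+1)-d) ((i:Int) - 1) + d * 10 ^ ((i:Int) - 1).toNat * c ((M+1)-d) ((i:Int) - 1)))).sum :=
          listFinsetSwap N D _
        have hinner : ∀ d ∈ D, (∑ i ∈ Finset.range N,
              (f ((M+1)-d) ((i:Int) - 1) + d * 10 ^ ((i:Int) - 1).toNat * c ((M+1)-d) ((i:Int) - 1)))
            = fsum N f ((M+1)-d) + d * wsum N c ((M+1)-d) := by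
          intro d hd
          obtain ⟨hd1, hd2⟩ := hDmem d hd
          have hNn : N = n.toNat + 1 := by omega
          rw [Finset.sum_add_distrib]
          congr 1
          · calc ∑ i ∈ Finset.range N, f ((M+1)-d) ((i:Int) - 1)
                = ∑ i ∈ Finset.range (n.toNat+1), f ((M+1)-d) ((i:Int) - 1) := by rw [hNn]
              _ = (∑ j ∈ Finset.range n.toNat, f ((M+1)-d) (((j+1:Nat):Int) - 1))
                  + f ((M+1)-d) (((0:Nat):Int) - 1) :=
                  Finset.sum_range_succ' (fun i => f ((M+1)-d) ((i:Int) - 1)) n.toNat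
              _ = ∑ j ∈ Finset.range n.toNat, f ((M+1)-d) ((j:Int)) := by
                  rw [show (((0:Nat):Int) - 1) = (-1:Int) by simp,
                    (hZ ((M+1)-d) (-1) (by omega)).2, add_zero]
                  exact Finset.sum_congr rfl (fun j _ => by
                    rw [show (((j+1:Nat)):Int) - 1 = (j:Int) from by push_cast; ring])
              _ = ∑ i ∈ Finset.range (n.toNat+1), f ((M+1)-d) ((i:Int)) := by
                  rw [Finset.sum_range_succ, (hZ ((M+1)-d) ((n.toNat:Int)) (by omega)).2, add_zero]
              _ = fsum N f ((M+1)-d) := by unfold fsum; rw [hNn]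
          · calc ∑ i ∈ Finset.range N, d * 10 ^ ((i:Int) - 1).toNat * c ((M+1)-d) ((i:Int) - 1)
                = ∑ i ∈ Finset.range (n.toNat+1), d * 10 ^ ((i:Int) - 1).toNat * c ((M+1)-d) ((i:Int) - 1) := by
                  rw [hNn]
              _ = (∑ j ∈ Finset.range n.toNat, d * 10 ^ ((((j+1:Nat)):Int) - 1).toNat * c ((M+1)-d) (((j+1:Nat):Int) - 1))
                  + d * 10 ^ ((((0:Nat)):Int) - 1).toNat * c ((M+1)-d) (((0:Nat):Int) - 1) :=
                  Finset.sum_range_succ' (fun i => d * 10 ^ ((i:Int) - 1).toNat * c ((M+1)-d) ((i:Int) - 1)) n.toNat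
              _ = ∑ j ∈ Finset.range n.toNat, d * (10^j * c ((M+1)-d) ((j:Int))) := by
                  rw [show (((0:Nat):Int) - 1) = (-1:Int) by simp,
                    (hZ ((M+1)-d) (-1) (by omega)).1, mul_zero, add_zero]
                  exact Finset.sum_congr rfl (fun j _ => by
                    rw [show (((j+1:Nat)):Int) - 1 = (j:Int) from by push_cast; ring,
                      show ((j:Int)).toNat = j from by omega]
                    ring)
              _ = d * ∑ j ∈ Finset.range n.toNat, 10^j * c ((M+1)-d) ((j:Int)) := by
                  rw [Finset.mul_sum]
              _ = d * ∑ i ∈ Finset.range (n.toNat+1), 10^i * c ((M+1)-d) ((i:Int)) := by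
                  rw [Finset.sum_range_succ, (hZ ((M+1)-d) ((n.toNat:Int)) (by omega)).1, mul_zero, add_zero]
              _ = d * wsum N c ((M+1)-d) := by unfold wsum; rw [hNn]
        rw [hswap, List.map_congr_left hinner] at hT
        have he : ((D.map (fun d => G ((M+1) - d) + d * W ((M+1) - d))).sum)
            - fsum N (maskF MOD c f (M+1) ((M+1)+1)) (M+1)
            = ((D.map (fun d => G ((M+1) - d) + d * W ((M+1) - d))).sum
                - (D.map (fun d => fsum N f ((M+1) - d) + d * wsum N c ((M+1) - d))).sum)
              + (((D.map (fun d => fsum N f ((M+1) - d) + d * wsum N c ((M+1) - d))).sum)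
                  - fsum N (maskF MOD c f (M+1) ((M+1)+1)) (M+1)) := by ring
        rw [he]
        exact dvd_add dvd1 hT

theorem loopInv (n MOD : Int) (hn : 0 ≤ n) (hMOD : MOD ≠ 0) :
    ∀ j : Nat, (j:Int) ≤ n →
      InvAB n MOD (j:Int)
        ((PySem.List.pyRange 1 ((j:Int)+1) 1).foldl (fnStepM_A MOD) (fnUpd2 (fun _ _ => 0) 0 0 1, fun _ _ => 0))
        ((PySem.List.pyRange 1 ((j:Int)+1) 1).foldl (fnStepM_B MOD) (fnUpd1 (fun _ => 0) 0 (PySem.Int.mod 1 MOD), fun _ => 0)) := by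
  intro j
  induction j with
  | zero =>
    intro _
    rw [show PySem.List.pyRange 1 (((0:Nat):Int)+1) 1 = [] from PySem.List.pyRange_one_eq_nil (by simp)]
    simp only [List.foldl_nil]
    constructor
    · intro r k hc
      constructor
      · show fnUpd2 (fun _ _ => 0) 0 0 1 r k = 0
        rw [fnUpd2_ne _ _ _ _ _ _ (by omega)]
      · rfl
    · intro r hr0 hrM
      have hr : r = 0 := by omega
      subst hr
      have hw : wsum (n+1).toNat (fnUpd2 (fun _ _ => 0) 0 0 1) 0 = 1 := by
        unfold wsum
        rw [Finset.sum_eq_single 0]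
        · norm_num [fnUpd2]
        · intro i _ hi
          rw [fnUpd2_ne _ _ _ _ _ _ (by omega)]
          simp
        · intro h0; exact absurd (Finset.mem_range.mpr (by omega)) h0
      have hf : fsum (n+1).toNat (fun _ _ => (0:Int)) 0 = 0 := by unfold fsum; simp
      constructor
      · show fnUpd1 (fun _ => 0) 0 (PySem.Int.mod 1 MOD) 0 = _
        rw [show fnUpd1 (fun _ => (0:Int)) 0 (PySem.Int.mod 1 MOD) 0 = PySem.Int.mod 1 MOD from by simp [fnUpd1]]
        rw [hw]
      · show (0:Int) = _
        rw [hf, pmZero hMOD]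
  | succ j ih =>
    intro hj
    rw [show (((j+1):Nat):Int) = (j:Int)+1 from by push_cast; ring]
    rw [PySem.List.pyRange_one_succ_right (show (1:Int) ≤ (j:Int)+1 by omega)]
    rw [List.foldl_append, List.foldl_append]
    simp only [List.foldl_cons, List.foldl_nil]
    exact stepPreserves n MOD (j:Int) hMOD (by omega) (by omega) _ _ _ _
      (ih (by omega))

theorem sum_pyRange_map (n : Int) (g : Int → Int) :
    ((PySem.List.pyRange 0 (n+1) 1).map g).sum = ∑ i ∈ Finset.range (n+1).toNat, g (i:Int) := by
  rw [PySem.List.pyRange_one, List.map_map]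
  rw [show ((n+1) - 0 : Int) = n+1 from by ring]
  rw [show (g ∘ fun k : Nat => (0:Int) + (k:Int)) = (fun k : Nat => g (k:Int)) from
    funext fun k => by simp]
  rfl


theorem fnAB_eq (n MOD : Int) (hn : 0 ≤ n) (hMOD : MOD ≠ 0) : fnA n MOD = fnB n MOD := by
  simp only [fnA, fnB, if_neg (show ¬ n < 0 by omega)]
  have h := loopInv n MOD hn hMOD n.toNat (by omega)
  rw [Int.toNat_of_nonneg hn] at h
  apply List.map_congr_left
  intro m hm
  obtain ⟨hm0, hm1⟩ := (PySem.List.mem_pyRange_one).mp hm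
  rw [sum_pyRange_map n _]
  exact ((h.2 m hm0 (by omega)).2).symm

-- ===== simulation: the list/array ports compute the fn-level model =====
def tbl (n : Int) (fn : Int → Int → Int) : List (List Int) :=
  (PySem.List.pyRange 0 (n+1) 1).map (fun i => (PySem.List.pyRange 0 (n+1) 1).map (fun j => fn i j))

theorem set_map_pyRange {α : Type} (n : Int) (h : Int → α) (i : Int) (v : α)
    (h0 : 0 ≤ i) (h1 : i ≤ n) :
    ((PySem.List.pyRange 0 (n+1) 1).map h).set i.toNat v
      = (PySem.List.pyRange 0 (n+1) 1).map (fun x => if x = i then v else h x) := by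
  apply List.ext_getElem
  · simp
  · intro k hk1 hk2
    simp only [List.getElem_set, List.getElem_map, PySem.List.getElem_pyRange_one]
    split_ifs <;> first | rfl | omega

theorem tbl_get (n : Int) (fn : Int → Int → Int) (i j : Int)
    (hi0 : 0 ≤ i) (hi1 : i ≤ n) (hj0 : 0 ≤ j) (hj1 : j ≤ n) :
    get2 (tbl n fn) i j = fn i j := by
  unfold get2 tbl
  rw [PySem.List.pyGetD_map_pyRange_of_nonneg _ (n+1) i [] hi0 (by omega)]
  exact PySem.List.pyGetD_map_pyRange_of_nonneg _ (n+1) j 0 hj0 (by omega)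

theorem tbl_set (n : Int) (fn : Int → Int → Int) (i j v : Int)
    (hi0 : 0 ≤ i) (hi1 : i ≤ n) (hj0 : 0 ≤ j) (hj1 : j ≤ n) :
    set2 (tbl n fn) i j v = tbl n (fnUpd2 fn i j v) := by
  unfold set2 tbl
  rw [PySem.List.pyGetD_map_pyRange_of_nonneg _ (n+1) i [] hi0 (by omega)]
  rw [set_map_pyRange n _ j v hj0 hj1]
  rw [set_map_pyRange n _ i _ hi0 hi1]
  apply List.map_congr_left
  intro x _
  by_cases hxi : x = i
  · rw [if_pos hxi, hxi]
    apply List.map_congr_left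
    intro y _
    by_cases hyj : y = j
    · rw [if_pos hyj, hyj]
      unfold fnUpd2
      rw [if_pos ⟨rfl, rfl⟩]
    · rw [if_neg hyj]
      unfold fnUpd2
      rw [if_neg (by tauto)]
  · rw [if_neg hxi]
    apply List.map_congr_left
    intro y _
    unfold fnUpd2
    rw [if_neg (by tauto)]

theorem foldl_sim {α β : Type} (T : α → β) (s1 : β → Int → β) (s2 : α → Int → α) :
    ∀ (l : List Int), (∀ s x, x ∈ l → s1 (T s) x = T (s2 s x)) → ∀ s0,
      l.foldl s1 (T s0) = T (l.foldl s2 s0)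
  | [], _, _ => rfl
  | x :: xs, h, s0 => by
    simp only [List.foldl_cons]
    rw [h s0 x (List.mem_cons_self ..)]
    exact foldl_sim T s1 s2 xs (fun s y hy => h s y (List.mem_cons_of_mem _ hy)) _

theorem stepD_rel (n MOD m k : Int) (hm : 1 ≤ m) (hmn : m ≤ n) (hk : 1 ≤ k) (hkn : k ≤ n)
    (c f : Int → Int → Int) (d : Int) (hd : 1 ≤ d) (hdm : d ≤ m) :
    stepD_A MOD m k (tbl n c, tbl n f) d
      = (tbl n (fnStepD MOD m k (c, f) d).1, tbl n (fnStepD MOD m k (c, f) d).2) := by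
  simp only [stepD_A, fnStepD]
  rw [tbl_get n c m k (by omega) hmn (by omega) hkn,
      tbl_get n c (m-d) (k-1) (by omega) (by omega) (by omega) (by omega),
      tbl_set n c m k _ (by omega) hmn (by omega) hkn,
      tbl_get n f m k (by omega) hmn (by omega) hkn,
      tbl_get n f (m-d) (k-1) (by omega) (by omega) (by omega) (by omega),
      tbl_get n (fnUpd2 c m k _) (m-d) (k-1) (by omega) (by omega) (by omega) (by omega),
      tbl_set n f m k _ (by omega) hmn (by omega) hkn]

theorem stepM_rel (n MOD m : Int) (hm : 1 ≤ m) (hmn : m ≤ n) (c f : Int → Int → Int) :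
    stepM_A MOD (tbl n c, tbl n f) m
      = (tbl n (fnStepM_A MOD (c, f) m).1, tbl n (fnStepM_A MOD (c, f) m).2) := by
  unfold stepM_A fnStepM_A
  refine foldl_sim (fun p : (Int → Int → Int) × (Int → Int → Int) => (tbl n p.1, tbl n p.2))
    _ _ (PySem.List.pyRange 1 (m+1) 1) ?_ (c, f)
  intro s k hk
  obtain ⟨hk1, hk2⟩ := PySem.List.mem_pyRange_one.mp hk
  refine foldl_sim (fun p : (Int → Int → Int) × (Int → Int → Int) => (tbl n p.1, tbl n p.2))
    _ _ (PySem.List.pyRange 1 (min 9 m + 1) 1) ?_ s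
  intro s' d hd
  obtain ⟨hd1, hd2⟩ := PySem.List.mem_pyRange_one.mp hd
  exact stepD_rel n MOD m k hm hmn hk1 (by omega) s'.1 s'.2 d hd1 (by omega)

theorem f_list_eq_fnA (n MOD : Int) (hn : 0 ≤ n) : f_list n MOD = fnA n MOD := by
  simp only [f_list, fnA]
  have hzero : (PySem.List.pyRange 0 (n+1) 1).map
      (fun _ => (PySem.List.pyRange 0 (n+1) 1).map (fun _ => (0:Int))) = tbl n (fun _ _ => 0) := rfl
  rw [hzero, tbl_set n _ 0 0 1 (le_refl 0) hn (le_refl 0) hn]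
  rw [show (tbl n (fnUpd2 (fun _ _ => 0) 0 0 1), tbl n (fun _ _ => 0))
      = (fun p : (Int → Int → Int) × (Int → Int → Int) => (tbl n p.1, tbl n p.2))
          (fnUpd2 (fun _ _ => 0) 0 0 1, fun _ _ => 0) from rfl]
  rw [foldl_sim (fun p : (Int → Int → Int) × (Int → Int → Int) => (tbl n p.1, tbl n p.2))
      (stepM_A MOD) (fnStepM_A MOD) (PySem.List.pyRange 1 (n+1) 1)
      (fun s m hm => by
        obtain ⟨hm1, hm2⟩ := PySem.List.mem_pyRange_one.mp hm
        exact stepM_rel n MOD m hm1 (by omega) s.1 s.2)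
      (fnUpd2 (fun _ _ => 0) 0 0 1, fun _ _ => 0)]
  unfold tbl
  rw [List.map_map]
  rfl

-- B side: Array state; toList is always the prefix table of the fn-level state
def vecp (m : Int) (g : Int → Int) : List Int := (PySem.List.pyRange 0 (m+1) 1).map g

theorem vecp_length (m : Int) (g : Int → Int) : (vecp m g).length = (m+1-0).toNat := by
  unfold vecp
  rw [List.length_map, PySem.List.length_pyRange_one]

theorem vecp_getD (m : Int) (g : Int → Int) (i : Int) (h0 : 0 ≤ i) (h1 : i ≤ m) :
    (vecp m g).getD i.toNat 0 = g i := by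
  unfold vecp
  rw [List.getD_eq_getElem _ _ (by rw [List.length_map, PySem.List.length_pyRange_one]; omega)]
  rw [List.getElem_map, PySem.List.getElem_pyRange_one]
  congr 1
  omega

theorem vecp_succ (m : Int) (g : Int → Int) (h : 0 ≤ m) :
    vecp m g = vecp (m-1) g ++ [g m] := by
  unfold vecp
  rw [show (m + 1 : Int) = (m - 1 + 1) + 1 from by ring]
  rw [PySem.List.pyRange_one_succ_right (by omega), List.map_append]
  simp

theorem array_getD_toList (a : Array Int) (i : Nat) (d : Int) : a.getD i d = a.toList.getD i d := by
  unfold Array.getD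
  split
  · rename_i h
    rw [List.getD_eq_getElem _ _ (by simpa using h)]
    simp [Array.getElem_toList]
  · rename_i h
    rw [List.getD_eq_getElem?_getD, List.getElem?_eq_none (by simp; omega)]
    rfl

theorem stepB_rel (MOD m : Int) (hm : 1 ≤ m) (W G : Int → Int) (aW aG : Array Int)
    (hW : aW.toList = vecp (m-1) W) (hG : aG.toList = vecp (m-1) G) :
    (stepM_B MOD (aW, aG) m).1.toList = vecp m (fnStepM_B MOD (W, G) m).1
    ∧ (stepM_B MOD (aW, aG) m).2.toList = vecp m (fnStepM_B MOD (W, G) m).2 := by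
  have hsize : aW.size = m.toNat := by
    rw [Array.size_eq_length_toList, hW, vecp_length]; omega
  have hsizeG : aG.size = m.toNat := by
    rw [Array.size_eq_length_toList, hG, vecp_length]; omega
  have hread : ∀ d : Int, 1 ≤ d → d ≤ m →
      aW.getD (aW.size - d.toNat) 0 = W (m - d) ∧ aG.getD (aG.size - d.toNat) 0 = G (m - d) := by
    intro d hd1 hd2
    constructor
    · rw [array_getD_toList, hW, hsize, show m.toNat - d.toNat = (m - d).toNat from by omega,
        vecp_getD (m-1) W (m-d) (by omega) (by omega)]
    · rw [array_getD_toList, hG, hsizeG, show m.toNat - d.toNat = (m - d).toNat from by omega,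
        vecp_getD (m-1) G (m-d) (by omega) (by omega)]
  have hfold : (PySem.List.pyRange 1 (min 9 m + 1) 1).foldl
      (fun (p : Int × Int) d => (p.1 + aW.getD (aW.size - d.toNat) 0,
        p.2 + (aG.getD (aG.size - d.toNat) 0 + d * aW.getD (aW.size - d.toNat) 0))) (0, 0)
      = (PySem.List.pyRange 1 (min 9 m + 1) 1).foldl
      (fun (p : Int × Int) d => (p.1 + W (m - d), p.2 + (G (m - d) + d * W (m - d)))) (0, 0) := by
    apply PySem.List.foldl_congr_mem
    intro acc d hd
    obtain ⟨hd1, hd2⟩ := PySem.List.mem_pyRange_one.mp hd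
    rw [(hread d hd1 (by omega)).1, (hread d hd1 (by omega)).2]
  have hup : ∀ (g : Int → Int) (v : Int), vecp (m-1) g ++ [v] = vecp m (fnUpd1 g m v) := by
    intro g v
    rw [vecp_succ m _ (by omega)]
    congr 1
    · unfold vecp
      apply List.map_congr_left
      intro x hx
      obtain ⟨hx1, hx2⟩ := PySem.List.mem_pyRange_one.mp hx
      unfold fnUpd1
      rw [if_neg (by omega)]
    · unfold fnUpd1
      rw [if_pos rfl]
  constructor
  · show (aW.push _).toList = _
    rw [Array.toList_push, hfold, hW, hup]
    rfl
  · show (aG.push _).toList = _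
    rw [Array.toList_push, hfold, hG, hup]
    rfl

theorem bLoop_rel (n MOD : Int) (hn : 0 ≤ n) :
    ∀ j : Nat, (j:Int) ≤ n →
      (((PySem.List.pyRange 1 ((j:Int)+1) 1).foldl (stepM_B MOD)
          (#[PySem.Int.mod 1 MOD], #[0])).1.toList
        = vecp (j:Int) ((PySem.List.pyRange 1 ((j:Int)+1) 1).foldl (fnStepM_B MOD)
          (fnUpd1 (fun _ => 0) 0 (PySem.Int.mod 1 MOD), fun _ => 0)).1)
      ∧ (((PySem.List.pyRange 1 ((j:Int)+1) 1).foldl (stepM_B MOD)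
          (#[PySem.Int.mod 1 MOD], #[0])).2.toList
        = vecp (j:Int) ((PySem.List.pyRange 1 ((j:Int)+1) 1).foldl (fnStepM_B MOD)
          (fnUpd1 (fun _ => 0) 0 (PySem.Int.mod 1 MOD), fun _ => 0)).2) := by
  intro j
  induction j with
  | zero =>
    intro _
    rw [show PySem.List.pyRange 1 (((0:Nat):Int)+1) 1 = [] from PySem.List.pyRange_one_eq_nil (by simp)]
    simp only [List.foldl_nil]
    constructor
    · show [PySem.Int.mod 1 MOD] = vecp 0 (fnUpd1 (fun _ => 0) 0 (PySem.Int.mod 1 MOD))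
      unfold vecp
      rw [show (0:Int)+1 = 0+1 from rfl, PySem.List.pyRange_one_singleton, List.map_singleton]
      unfold fnUpd1
      rw [if_pos rfl]
    · show [(0:Int)] = vecp 0 (fun _ => 0)
      unfold vecp
      rw [PySem.List.pyRange_one_singleton, List.map_singleton]
  | succ j ih =>
    intro hj
    rw [show (((j+1):Nat):Int) = (j:Int)+1 from by push_cast; ring]
    rw [PySem.List.pyRange_one_succ_right (show (1:Int) ≤ (j:Int)+1 by omega)]
    rw [List.foldl_append, List.foldl_append]
    simp only [List.foldl_cons, List.foldl_nil]
    obtain ⟨h1, h2⟩ := ih (by omega)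
    exact stepB_rel MOD ((j:Int)+1) (by omega)
      ((PySem.List.pyRange 1 ((j:Int)+1) 1).foldl (fnStepM_B MOD)
        (fnUpd1 (fun _ => 0) 0 (PySem.Int.mod 1 MOD), fun _ => 0)).1
      ((PySem.List.pyRange 1 ((j:Int)+1) 1).foldl (fnStepM_B MOD)
        (fnUpd1 (fun _ => 0) 0 (PySem.Int.mod 1 MOD), fun _ => 0)).2
      ((PySem.List.pyRange 1 ((j:Int)+1) 1).foldl (stepM_B MOD)
        (#[PySem.Int.mod 1 MOD], #[0])).1
      ((PySem.List.pyRange 1 ((j:Int)+1) 1).foldl (stepM_B MOD)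
        (#[PySem.Int.mod 1 MOD], #[0])).2
      (by rw [show ((j:Int)+1-1) = (j:Int) from by ring]; exact h1)
      (by rw [show ((j:Int)+1-1) = (j:Int) from by ring]; exact h2)

theorem f_list_alt_eq_fnB (n MOD : Int) (hn : 0 ≤ n) : f_list_alt n MOD = fnB n MOD := by
  simp only [f_list_alt, fnB, if_neg (show ¬ n < 0 by omega)]
  have h := (bLoop_rel n MOD hn n.toNat (by omega)).2
  rw [Int.toNat_of_nonneg hn] at h
  rw [h]
  rfl

-- ===== VERDICT (by name: the statement is the Claim_ definition above) =====
theorem f_list_spec : Claim_equal_f_list := by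
  unfold Claim_equal_f_list
  intro n MOD _ hpre
  obtain ⟨hn, hMOD⟩ := hpre
  unfold Spec_f_list
  rw [f_list_eq_fnA n MOD hn, f_list_alt_eq_fnB n MOD hn]
  exact fnAB_eq n MOD hn hMOD
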